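-- pv_equiv track=rewrite | github.com/kafoulk/cumminsSER13_2026 | backend/main.py | _suggest_step_title
-- ===== SOURCE A (Python) =====
-- def _suggest_step_title(instructions: str, index: int) -> str:
--     lowered = instructions.lower()
--     if any(token in lowered for token in {"safety", "hazard", "isolate", "brake"}):
--         return "Safety Containment Check"
--     if any(token in lowered for token in {"coolant", "overheat", "thermostat", "fan"}):
--         return "Cooling System Validation"
--     if any(token in lowered for token in {"fuel", "injector", "rail"}):
--         return "Fuel System Validation"
--     if any(token in lowered for token in {"electrical", "harness", "connector", "sensor"}):
--         return "Electrical Integrity Check"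
--     if any(token in lowered for token in {"scan", "dtc", "freeze-frame"}):
--         return "ECU Diagnostic Scan"
--     return f"Diagnostic Step {index}"
-- ===== SOURCE B (Python) =====
-- _KEYWORD_PRIORITY = {
--     "safety": 0, "hazard": 0, "isolate": 0, "brake": 0,
--     "coolant": 1, "overheat": 1, "thermostat": 1, "fan": 1,
--     "fuel": 2, "injector": 2, "rail": 2,
--     "electrical": 3, "harness": 3, "connector": 3, "sensor": 3,
--     "scan": 4, "dtc": 4, "freeze-frame": 4,
-- }
--
-- _TITLES = [
--     "Safety Containment Check",
--     "Cooling System Validation",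
--     "Fuel System Validation",
--     "Electrical Integrity Check",
--     "ECU Diagnostic Scan",
-- ]
--
-- def _suggest_step_title(instructions: str, index: int) -> str:
--     lowered = instructions.lower()
--     best = min((prio for kw, prio in _KEYWORD_PRIORITY.items() if kw in lowered),
--                default=None)
--     if best is None:
--         return f"Diagnostic Step {index}"
--     return _TITLES[best]
-- ===== Notes on version B (the rewrite author's own statement) =====
-- stated objective: alternative
-- what changed: Instead of an ordered short-circuiting if-chain over keyword groups, B scans one flat keyword-to-priority map and aggregates the minimum priority of all matching keywords, then indexes a title table; the minimum-priority aggregation reproduces the chain's group priority order.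
import Mathlib
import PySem

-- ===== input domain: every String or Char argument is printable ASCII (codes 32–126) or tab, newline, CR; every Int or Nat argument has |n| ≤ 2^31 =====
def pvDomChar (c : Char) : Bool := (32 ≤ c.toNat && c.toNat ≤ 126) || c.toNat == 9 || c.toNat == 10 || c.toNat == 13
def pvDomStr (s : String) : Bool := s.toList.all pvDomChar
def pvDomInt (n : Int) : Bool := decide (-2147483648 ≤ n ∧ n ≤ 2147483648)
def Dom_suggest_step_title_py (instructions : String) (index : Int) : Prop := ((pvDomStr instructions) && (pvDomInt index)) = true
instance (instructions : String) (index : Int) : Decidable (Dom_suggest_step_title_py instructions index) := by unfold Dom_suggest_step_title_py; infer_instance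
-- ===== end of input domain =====

-- B replaces A's short-circuiting if-chain with a min-priority aggregation over one flat keyword→priority map plus a title table (objective: alternative); same return value everywhere.
-- ===== PORT A =====
def suggest_step_title_py (instructions : String) (index : Int) : String :=
  let lowered := PySem.Str.lower instructions
  if ["safety", "hazard", "isolate", "brake"].any (fun token => PySem.Str.isIn token lowered) then
    "Safety Containment Check"
  else if ["coolant", "overheat", "thermostat", "fan"].any (fun token => PySem.Str.isIn token lowered) then
    "Cooling System Validation"
  else if ["fuel", "injector", "rail"].any (fun token => PySem.Str.isIn token lowered) then
    "Fuel System Validation"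
  else if ["electrical", "harness", "connector", "sensor"].any (fun token => PySem.Str.isIn token lowered) then
    "Electrical Integrity Check"
  else if ["scan", "dtc", "freeze-frame"].any (fun token => PySem.Str.isIn token lowered) then
    "ECU Diagnostic Scan"
  else
    "Diagnostic Step " ++ PySem.Int.toStr index

-- ===== PORT B =====
-- flat keyword → priority map, in B's dict insertion order
def pvKeywordPriority : List (String × Nat) :=
  [ ("safety", 0), ("hazard", 0), ("isolate", 0), ("brake", 0),
    ("coolant", 1), ("overheat", 1), ("thermostat", 1), ("fan", 1),
    ("fuel", 2), ("injector", 2), ("rail", 2),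
    ("electrical", 3), ("harness", 3), ("connector", 3), ("sensor", 3),
    ("scan", 4), ("dtc", 4), ("freeze-frame", 4) ]

def pvTitles : List String :=
  [ "Safety Containment Check", "Cooling System Validation", "Fuel System Validation",
    "Electrical Integrity Check", "ECU Diagnostic Scan" ]

-- Python's min(generator, default=None): running minimum over the matching priorities
def pvMinStep (lowered : String) (acc : Option Nat) (p : String × Nat) : Option Nat :=
  if PySem.Str.isIn p.1 lowered then
    some (match acc with | none => p.2 | some m => min m p.2)
  else acc

def suggest_step_title_py_alt (instructions : String) (index : Int) : String :=
  let lowered := PySem.Str.lower instructions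
  match pvKeywordPriority.foldl (pvMinStep lowered) none with
  | none => "Diagnostic Step " ++ PySem.Int.toStr index
  | some best => pvTitles.getD best ""

-- ===== PRECONDITION & SPEC =====
def Spec_suggest_step_title_py (instructions : String) (index : Int) (out : String) : Prop := out = suggest_step_title_py_alt instructions index
instance (instructions : String) (index : Int) (out : String) : Decidable (Spec_suggest_step_title_py instructions index out) := by unfold Spec_suggest_step_title_py; infer_instance

-- ===== CLAIM (what is proved, stated in full; the proofs are below) =====
def Claim_equal_suggest_step_title_py : Prop := ∀ (instructions : String) (index : Int), Dom_suggest_step_title_py instructions index → Spec_suggest_step_title_py instructions index (suggest_step_title_py instructions index)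

-- ===== LEMMAS AND PROOFS =====

-- folding a group whose keywords all carry the same priority g collapses to one conditional step on the group's 'any'
theorem pv_group_fold (lowered : String) (g : Nat) :
    ∀ (kws : List String) (acc : Option Nat),
      (kws.map (fun k => (k, g))).foldl (pvMinStep lowered) acc
        = if kws.any (fun token => PySem.Str.isIn token lowered) then
            some (match acc with | none => g | some m => min m g)
          else acc := by
  intro kws
  induction kws with
  | nil => intro acc; simp
  | cons k rest ih =>
    intro acc
    simp only [List.map, List.foldl, List.any_cons, pvMinStep]
    by_cases h : PySem.Str.isIn k lowered = true
    · rw [ih]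
      simp only [PySem.Str.isIn] at h
      cases acc <;> simp [h, min_self]
    · simp only [h]
      rw [ih]
      simp only [PySem.Str.isIn] at h
      simp

-- ===== VERDICT (by name: the statement is the Claim_ definition above) =====
theorem suggest_step_title_py_spec : Claim_equal_suggest_step_title_py := by
  intro instructions index _
  unfold Spec_suggest_step_title_py suggest_step_title_py suggest_step_title_py_alt
  have hsplit : pvKeywordPriority
      = (["safety", "hazard", "isolate", "brake"].map (fun k => (k, 0)))
        ++ (["coolant", "overheat", "thermostat", "fan"].map (fun k => (k, 1)))
        ++ (["fuel", "injector", "rail"].map (fun k => (k, 2)))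
        ++ (["electrical", "harness", "connector", "sensor"].map (fun k => (k, 3)))
        ++ (["scan", "dtc", "freeze-frame"].map (fun k => (k, 4))) := by rfl
  rw [hsplit]
  simp only [List.foldl_append, pv_group_fold]
  split_ifs <;> simp_all [pvTitles]
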